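-- pv_equiv track=rewrite | github.com/Mitarushi/SuperCon_2020 | sort_test/Mitarushi_sort_func.py | simple_sort_cost3
-- ===== SOURCE A (Python) =====
-- def simple_sort_cost3(s):
--     cost = 0
--     for ind, i in enumerate(s):
--         cost += (26 - i) * ind
--     s.sort()
--     for ind, i in enumerate(s):
--         cost -= (26 - i) * ind
--     return cost
-- ===== SOURCE B (Python) =====
-- def simple_sort_cost3(s):
--     # Return-value equivalence only: A additionally sorts s in place, B does not sort at all.
--     # B computes each element's stable rank in the sorted order by pairwise comparisons
--     # (rank = #smaller elements + #equal elements appearing earlier) and sums (rank - index) * value,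
--     # which equals A's index-weighted cost difference since the constant 26 terms cancel.
--     total = 0
--     for j, v in enumerate(s):
--         rank = sum(1 for k, u in enumerate(s) if u < v or (u == v and k < j))
--         total += (rank - j) * v
--     return total
-- ===== Notes on version B (the rewrite author's own statement) =====
-- stated objective: alternative
-- what changed: B eliminates the sort entirely: instead of A's sort plus two index-weighted (26 - v)*i passes, B computes each element's stable rank by pairwise comparison counting and sums (rank - index) * value in one pass.
import Mathlib
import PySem

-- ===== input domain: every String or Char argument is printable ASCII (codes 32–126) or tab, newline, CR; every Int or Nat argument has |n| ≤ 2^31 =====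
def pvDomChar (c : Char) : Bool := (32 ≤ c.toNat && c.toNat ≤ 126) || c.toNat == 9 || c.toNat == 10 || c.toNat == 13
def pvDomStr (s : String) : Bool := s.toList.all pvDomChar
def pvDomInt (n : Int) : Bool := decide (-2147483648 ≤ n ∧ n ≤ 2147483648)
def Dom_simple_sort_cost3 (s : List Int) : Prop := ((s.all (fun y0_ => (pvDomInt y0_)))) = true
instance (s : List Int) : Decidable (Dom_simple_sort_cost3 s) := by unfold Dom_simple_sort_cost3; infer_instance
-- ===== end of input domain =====

-- B removes the sort: it computes each element's stable rank by pairwise comparison counting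
-- and sums (rank - index) * value; return-value equivalence only (A sorts s in place, B does not).

-- ===== PORT A =====
def simple_sort_cost3 (s : List Int) : Int :=
  let cost := (PySem.List.enumerate s).foldl (fun c p => c + (26 - p.2) * p.1) 0
  let t := PySem.List.sorted s (fun x => x) false
  (PySem.List.enumerate t).foldl (fun c p => c - (26 - p.2) * p.1) cost

-- ===== PORT B =====
def simple_sort_cost3_alt (s : List Int) : Int :=
  (PySem.List.enumerate s).foldl (fun total p =>
    let rank : Int :=
      ((PySem.List.enumerate s).filter
        (fun q => decide (q.2 < p.2) || (q.2 == p.2 && decide (q.1 < p.1)))).length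
    total + (rank - p.1) * p.2) 0

-- ===== PRECONDITION & SPEC =====
def Spec_simple_sort_cost3 (s : List Int) (out : Int) : Prop := out = simple_sort_cost3_alt s
instance (s : List Int) (out : Int) : Decidable (Spec_simple_sort_cost3 s out) := by unfold Spec_simple_sort_cost3; infer_instance

-- ===== CLAIM (what is proved, stated in full; the proofs are below) =====
def Claim_equal_simple_sort_cost3 : Prop := ∀ (s : List Int), Dom_simple_sort_cost3 s → Spec_simple_sort_cost3 s (simple_sort_cost3 s)

-- ===== LEMMAS AND PROOFS =====

-- index-weighted sum Σ p.1 * p.2 over enumerate l k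
def pvS (l : List Int) (k : Int) : Int :=
  ((PySem.List.enumerate l k).map (fun p => p.1 * p.2)).sum

-- Σ over elements of value * (# strictly smaller elements)
def pvAA (l : List Int) : Int :=
  (l.map (fun x => x * (l.countP (fun y => decide (y < x)) : Int))).sum

-- Σ over elements of value * (# equal elements appearing earlier)
def pvBB : List Int → Int
  | [] => 0
  | a :: l => pvBB l + a * (l.count a : Int)

theorem pvS_cons (a : Int) (l : List Int) (k : Int) :
    pvS (a :: l) k = k * a + pvS l (k + 1) := by
  simp [pvS, PySem.List.enumerate_cons]

theorem pvS_succ (l : List Int) : ∀ k, pvS l (k + 1) = pvS l k + l.sum := by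
  induction l with
  | nil => intro k; simp [pvS, PySem.List.enumerate_nil]
  | cons a l ih =>
    intro k
    rw [pvS_cons, pvS_cons, ih (k + 1)]
    simp [List.sum_cons]; ring

theorem pv_enum_fst_ge (l : List Int) : ∀ (k : Int), ∀ p ∈ PySem.List.enumerate l k, k ≤ p.1 := by
  induction l with
  | nil => intro k p hp; simp [PySem.List.enumerate_nil] at hp
  | cons a l ih =>
    intro k p hp
    rw [PySem.List.enumerate_cons] at hp
    rcases List.mem_cons.mp hp with hp | hp
    · simp [hp]
    · have := ih (k + 1) p hp; omega

theorem pv_sum_map_neg (l : List (Int × Int)) (f : Int × Int → Int) :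
    (l.map (fun p => -(f p))).sum = -((l.map f).sum) := by
  induction l with
  | nil => simp
  | cons x xs ih => simp [ih]; ring

theorem pv_countP_or (l : List (Int × Int)) (p q : Int × Int → Bool)
    (h : ∀ x, ¬(p x = true ∧ q x = true)) :
    l.countP (fun x => p x || q x) = l.countP p + l.countP q := by
  induction l with
  | nil => simp
  | cons x xs ih =>
    rw [List.countP_cons, List.countP_cons, List.countP_cons, ih]
    have := h x
    by_cases hp : p x = true <;> by_cases hq : q x = true <;> simp_all <;> omega

-- Σ over l of x * (if a = x then 1 else 0) = a * count a
theorem pv_sum_ite_count (a : Int) (l : List Int) :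
    (l.map (fun x => (if a = x then (1 : Int) else 0) * x)).sum = a * (l.count a : Int) := by
  induction l with
  | nil => simp
  | cons x xs ih =>
    rw [List.map_cons, List.sum_cons, ih, List.count_cons]
    by_cases h : a = x
    · subst h
      simp only [beq_self_eq_true, if_pos]
      push_cast
      ring
    · have hb : (x == a) = false := beq_eq_false_iff_ne.mpr (Ne.symm h)
      simp only [hb, Bool.false_eq_true, if_false, if_neg h]
      push_cast
      ring

-- the eq-before part of the rank sum, over enumerate with any start
theorem pvBB_enum (l : List Int) : ∀ (k : Int),
    ((PySem.List.enumerate l k).map (fun p =>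
      (((PySem.List.enumerate l k).countP (fun q => q.2 == p.2 && decide (q.1 < p.1))) : Int) * p.2)).sum
    = pvBB l := by
  induction l with
  | nil => intro k; simp [PySem.List.enumerate_nil, pvBB]
  | cons a l ih =>
    intro k
    rw [PySem.List.enumerate_cons, List.map_cons, List.sum_cons]
    have hhead : (((k, a) :: PySem.List.enumerate l (k + 1)).countP
        (fun q => q.2 == (k, a).2 && decide (q.1 < (k, a).1))) = 0 := by
      apply List.countP_eq_zero.mpr
      intro q hq
      rcases List.mem_cons.mp hq with h | h
      · subst h; simp
      · have := pv_enum_fst_ge l (k + 1) q h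
        simp only [Bool.and_eq_true, decide_eq_true_eq, not_and]
        intro _; omega
    have htail : ∀ p ∈ PySem.List.enumerate l (k + 1),
        ((((k, a) :: PySem.List.enumerate l (k + 1)).countP
          (fun q => q.2 == p.2 && decide (q.1 < p.1))) : Int) * p.2
        = (((PySem.List.enumerate l (k + 1)).countP
            (fun q => q.2 == p.2 && decide (q.1 < p.1))) : Int) * p.2
          + (if a = p.2 then (1 : Int) else 0) * p.2 := by
      intro p hp
      have hk : k + 1 ≤ p.1 := pv_enum_fst_ge l (k + 1) p hp
      have hdec : decide (k < p.1) = true := decide_eq_true (by omega)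
      rw [List.countP_cons]
      by_cases hap : a = p.2
      · simp only [hap, beq_self_eq_true, Bool.true_and, hdec, if_pos]
        push_cast; ring
      · have hb : ((k, a).2 == p.2) = false := beq_eq_false_iff_ne.mpr hap
        simp only [hb, Bool.false_and, Bool.false_eq_true, if_false, hap]
        push_cast; ring
    rw [List.map_congr_left htail, PySem.List.sum_map_add_int, ih (k + 1)]
    have h1 : (fun (p : Int × Int) => (if a = p.2 then (1 : Int) else 0) * p.2)
        = (fun (x : Int) => (if a = x then (1 : Int) else 0) * x) ∘ (fun p => p.2) := rfl
    rw [h1, ← List.map_map, PySem.List.map_snd_enumerate, pv_sum_ite_count, hhead]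
    simp [pvBB]

-- the strictly-less part collapses to pvAA
theorem pvAA_enum (l : List Int) (k : Int) :
    ((PySem.List.enumerate l k).map (fun p =>
      ((l.countP (fun y => decide (y < p.2))) : Int) * p.2)).sum = pvAA l := by
  have h1 : (fun (p : Int × Int) => ((l.countP (fun y => decide (y < p.2))) : Int) * p.2)
      = (fun (x : Int) => ((l.countP (fun y => decide (y < x))) : Int) * x) ∘ (fun p => p.2) := rfl
  rw [h1, ← List.map_map, PySem.List.map_snd_enumerate]
  unfold pvAA
  exact congrArg List.sum (List.map_congr_left (fun x _ => by ring))

theorem pvAA_perm {l1 l2 : List Int} (h : l1.Perm l2) : pvAA l1 = pvAA l2 := by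
  unfold pvAA
  have hf : (fun (x : Int) => x * (l1.countP (fun y => decide (y < x)) : Int))
      = (fun (x : Int) => x * (l2.countP (fun y => decide (y < x)) : Int)) := by
    funext x; rw [h.countP_eq]
  rw [hf]
  exact (h.map _).sum_eq

theorem pvBB_perm {l1 l2 : List Int} (h : l1.Perm l2) : pvBB l1 = pvBB l2 := by
  induction h with
  | nil => rfl
  | cons a h ih => simp [pvBB, ih, h.count_eq]
  | swap x y l =>
    by_cases hxy : x = y
    · subst hxy; rfl
    · have h1 : (x == y) = false := beq_eq_false_iff_ne.mpr hxy
      have h2 : (y == x) = false := beq_eq_false_iff_ne.mpr (Ne.symm hxy)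
      simp only [pvBB, List.count_cons, h1, h2, Bool.false_eq_true, if_false]
      push_cast
      ring
  | trans h1 h2 ih1 ih2 => omega

-- Σ over t of x * (if a < x then 1 else 0), when a is a lower bound of t
theorem pv_sum_ite_lt (a : Int) (t : List Int) (h : ∀ x ∈ t, a ≤ x) :
    (t.map (fun x => (if a < x then (1 : Int) else 0) * x)).sum
      = t.sum - a * (t.count a : Int) := by
  induction t with
  | nil => simp
  | cons x xs ih =>
    have hx : a ≤ x := h x (List.mem_cons_self)
    have ih' := ih (fun y hy => h y (List.mem_cons_of_mem _ hy))
    rw [List.map_cons, List.sum_cons, ih', List.sum_cons, List.count_cons]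
    by_cases hax : a < x
    · have hb : (x == a) = false := beq_eq_false_iff_ne.mpr (by omega)
      simp only [if_pos hax, hb, Bool.false_eq_true, if_false]
      push_cast; ring
    · have hxa : x = a := by omega
      subst hxa
      simp only [if_neg hax, beq_self_eq_true, if_true]
      push_cast; ring

theorem pv_sorted_sum (t : List Int) (hs : t.Pairwise (· ≤ ·)) :
    pvAA t + pvBB t = pvS t 0 := by
  induction t with
  | nil => simp [pvAA, pvBB, pvS, PySem.List.enumerate_nil]
  | cons a t ih =>
    rw [List.pairwise_cons] at hs
    obtain ⟨ha, hs'⟩ := hs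
    have hAA : pvAA (a :: t) = pvAA t + (t.sum - a * (t.count a : Int)) := by
      unfold pvAA
      rw [List.map_cons, List.sum_cons]
      have hhead : (a :: t).countP (fun y => decide (y < a)) = 0 := by
        apply List.countP_eq_zero.mpr
        intro y hy
        rcases List.mem_cons.mp hy with h | h
        · subst h; simp
        · have := ha y h; simp; omega
      have htail : ∀ x ∈ t,
          x * (((a :: t).countP (fun y => decide (y < x))) : Int)
          = x * ((t.countP (fun y => decide (y < x))) : Int)
            + (if a < x then (1 : Int) else 0) * x := by
        intro x hx
        rw [List.countP_cons]
        by_cases hax : a < x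
        · rw [if_pos (by simpa using hax), if_pos hax]
          push_cast; ring
        · rw [if_neg (by simpa using hax), if_neg hax]
          push_cast; ring
      rw [List.map_congr_left htail, PySem.List.sum_map_add_int,
          pv_sum_ite_lt a t ha, hhead]
      push_cast; ring
    have hBB : pvBB (a :: t) = pvBB t + a * (t.count a : Int) := rfl
    rw [hAA, hBB, pvS_cons, pvS_succ, ← ih hs']
    ring

-- A's per-list pass: Σ (26 - v) * i = 26 * (Σ of indices) - pvS
theorem pvT_eq (l : List Int) :
    ((PySem.List.enumerate l).map (fun p => (26 - p.2) * p.1)).sum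
      = 26 * ((PySem.List.enumerate l).map (fun p => p.1)).sum - pvS l 0 := by
  have h : ∀ p ∈ PySem.List.enumerate l, (26 - p.2) * p.1 = 26 * p.1 + -(p.1 * p.2) := by
    intro p _; ring
  rw [List.map_congr_left h, PySem.List.sum_map_add_int, pv_sum_map_neg,
      List.sum_map_mul_left]
  rfl

theorem simple_sort_cost3_eq (s : List Int) :
    simple_sort_cost3 s = simple_sort_cost3_alt s := by
  have hBv : simple_sort_cost3_alt s = pvAA s + pvBB s - pvS s 0 := by
    show (PySem.List.enumerate s).foldl (fun total p =>
        total + ((((PySem.List.enumerate s).filter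
          (fun q => decide (q.2 < p.2) || (q.2 == p.2 && decide (q.1 < p.1)))).length : Int)
          - p.1) * p.2) 0 = _
    rw [PySem.List.foldl_add]
    have h : ∀ p ∈ PySem.List.enumerate s,
        ((((PySem.List.enumerate s).filter
          (fun q => decide (q.2 < p.2) || (q.2 == p.2 && decide (q.1 < p.1)))).length : Int)
          - p.1) * p.2
        = ((s.countP (fun y => decide (y < p.2))) : Int) * p.2
          + ((((PySem.List.enumerate s).countP
              (fun q => q.2 == p.2 && decide (q.1 < p.1))) : Int) * p.2
            + -(p.1 * p.2)) := by
      intro p _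
      rw [← List.countP_eq_length_filter,
          pv_countP_or _ (fun q => decide (q.2 < p.2))
            (fun q => q.2 == p.2 && decide (q.1 < p.1))
            (by intro x hx
                obtain ⟨h1, h2⟩ := hx
                have h1' : x.2 < p.2 := of_decide_eq_true h1
                obtain ⟨h2a, h2b⟩ : x.2 = p.2 ∧ x.1 < p.1 := by simpa using h2
                omega)]
      have hlt : (PySem.List.enumerate s).countP (fun q => decide (q.2 < p.2))
          = s.countP (fun y => decide (y < p.2)) := by
        conv_rhs => rw [← PySem.List.map_snd_enumerate s 0, List.countP_map]
        rfl
      rw [hlt]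
      push_cast; ring
    rw [List.map_congr_left h, PySem.List.sum_map_add_int, PySem.List.sum_map_add_int,
        pv_sum_map_neg, pvAA_enum, pvBB_enum]
    show _ = pvAA s + pvBB s - pvS s 0
    unfold pvS
    ring
  have hAv : simple_sort_cost3 s
      = pvS (PySem.List.sorted s (fun x => x) false) 0 - pvS s 0 := by
    show (PySem.List.enumerate (PySem.List.sorted s (fun x => x) false)).foldl
        (fun c p => c - (26 - p.2) * p.1)
        ((PySem.List.enumerate s).foldl (fun c p => c + (26 - p.2) * p.1) 0) = _
    rw [show (fun (c : Int) (p : Int × Int) => c - (26 - p.2) * p.1)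
          = (fun (c : Int) (p : Int × Int) => c + (-((26 - p.2) * p.1))) from by
          funext c p; ring]
    rw [PySem.List.foldl_add, PySem.List.foldl_add, pv_sum_map_neg, pvT_eq, pvT_eq]
    have hidx : ((PySem.List.enumerate (PySem.List.sorted s (fun x => x) false)).map
          (fun p => p.1)).sum = ((PySem.List.enumerate s).map (fun p => p.1)).sum := by
      rw [show (fun (p : Int × Int) => p.1) = (fun p : Int × Int => p.1) from rfl,
          PySem.List.map_fst_enumerate, PySem.List.map_fst_enumerate,
          (PySem.List.sorted_perm s (fun x => x) false).length_eq]
    rw [hidx]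
    ring
  have hperm := PySem.List.sorted_perm s (fun x => x) false
  have hsorted : (PySem.List.sorted s (fun x => x) false).Pairwise (· ≤ ·) :=
    PySem.List.sorted_pairwise s (fun x => x)
  have hkey := pv_sorted_sum _ hsorted
  rw [hAv, hBv, ← hkey, pvAA_perm hperm, pvBB_perm hperm]

-- ===== VERDICT (by name: the statement is the Claim_ definition above) =====
theorem simple_sort_cost3_spec : Claim_equal_simple_sort_cost3 := by
  intro s _
  exact simple_sort_cost3_eq s
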